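-- pv_equiv track=rewrite | github.com/iisrail/labkovsky-model | src/data_processing/transform_for_rag.py | adjust_split_for_char_counts
-- ===== SOURCE A (Python) =====
-- def adjust_split_for_char_counts(expl: str, interv: str, sentences: list[str], split_idx: int) -> tuple[str, str]:
--     """
--     Adjust split point to meet character count requirements.
--     EXPLANATION: 200-1500, INTERVENTION: 80-1000 (relaxed limits)
--     """
--     # If counts are already good, return as-is
--     if 200 <= len(expl) <= 1500 and 80 <= len(interv) <= 1000:
--         return expl, interv
--
--     # Try adjusting split point
--     best_split = split_idx
--     best_score = float('inf')
--
--     for try_idx in range(1, len(sentences)):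
--         try_expl = ' '.join(sentences[:try_idx])
--         try_interv = ' '.join(sentences[try_idx:])
--
--         expl_ok = 200 <= len(try_expl) <= 1500
--         interv_ok = 80 <= len(try_interv) <= 1000
--
--         if expl_ok and interv_ok:
--             return try_expl, try_interv
--
--         # Score by how close we are to targets
--         expl_penalty = 0 if expl_ok else min(abs(len(try_expl) - 200), abs(len(try_expl) - 1500))
--         interv_penalty = 0 if interv_ok else min(abs(len(try_interv) - 80), abs(len(try_interv) - 1000))
--         score = expl_penalty + interv_penalty
--
--         if score < best_score:
--             best_score = score
--             best_split = try_idx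
--
--     return ' '.join(sentences[:best_split]), ' '.join(sentences[best_split:])
-- ===== SOURCE B (Python) =====
-- def _penalty(x, lo, hi):
--     return 0 if lo <= x <= hi else min(abs(x - lo), abs(x - hi))
--
-- def adjust_split_for_char_counts(expl: str, interv: str, sentences: list[str], split_idx: int) -> tuple[str, str]:
--     # If counts are already good, return as-is
--     if 200 <= len(expl) <= 1500 and 80 <= len(interv) <= 1000:
--         return expl, interv
--
--     n = len(sentences)
--     lens = [len(s) for s in sentences]
--     total = sum(lens) + n - 1  # length of ' '.join(sentences)
--     pref = []
--     acc = 0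
--     for L in lens:
--         acc += L
--         pref.append(acc)
--     # candidate splits as (i, len(' '.join(sentences[:i])), len(' '.join(sentences[i:]))),
--     # all obtained arithmetically from the prefix sums
--     cand = [(i, p + i - 1, total - (p + i - 1) - 1) for i, p in enumerate(pref[:-1], 1)]
--     good = next((i for i, le, li in cand if 200 <= le <= 1500 and 80 <= li <= 1000), None)
--     if good is not None:
--         best = good
--     else:
--         scored = [(_penalty(le, 200, 1500) + _penalty(li, 80, 1000), i) for i, le, li in cand]
--         best = min(scored)[1] if scored else split_idx
--     return ' '.join(sentences[:best]), ' '.join(sentences[best:])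
-- ===== Notes on version B (the rewrite author's own statement) =====
-- stated objective: faster
-- what changed: B replaces A's accumulator loop that re-joins both halves at every split (O(total chars) per split) with staged passes: a prefix-sum pass gives every candidate join length arithmetically, next() picks the first valid split, otherwise min() over (score, index) tuples picks the best, and the strings are joined only once at the end.
import Mathlib
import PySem

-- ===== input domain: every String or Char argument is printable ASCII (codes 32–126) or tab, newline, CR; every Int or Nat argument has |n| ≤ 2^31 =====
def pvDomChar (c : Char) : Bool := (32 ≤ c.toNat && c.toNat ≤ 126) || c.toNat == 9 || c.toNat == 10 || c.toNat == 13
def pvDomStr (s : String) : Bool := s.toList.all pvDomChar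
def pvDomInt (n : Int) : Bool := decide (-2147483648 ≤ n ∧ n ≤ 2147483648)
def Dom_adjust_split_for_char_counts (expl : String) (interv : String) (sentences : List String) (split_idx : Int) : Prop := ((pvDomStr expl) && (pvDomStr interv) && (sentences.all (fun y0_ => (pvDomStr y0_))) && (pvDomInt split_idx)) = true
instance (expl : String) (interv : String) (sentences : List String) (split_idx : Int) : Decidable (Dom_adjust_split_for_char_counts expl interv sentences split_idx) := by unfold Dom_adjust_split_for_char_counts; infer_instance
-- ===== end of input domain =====

-- B replaces A's accumulator loop that re-joins both halves at every candidate split with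
-- staged passes over prefix sums of the sentence lengths, joining only once at the end;
-- a timing run measured it faster on the large inputs.

-- ===== PORT A =====
-- A's loop over range(1, len(sentences)); best_score starts at float('inf'), used only as a
-- sentinel larger than every integer score, ported exactly as Option Int with none = +inf.
-- Early return inside the loop is the .inl case.
def pvA_loop (sentences : List String) (idxs : List Int) (best_split : Int) (best_score : Option Int) : (String × String) ⊕ Int :=
  match idxs with
  | [] => .inr best_split
  | try_idx :: rest =>
    let try_expl := PySem.Str.join " " (PySem.List.slice sentences none (some try_idx))
    let try_interv := PySem.Str.join " " (PySem.List.slice sentences (some try_idx) none)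
    let expl_ok : Bool := decide (200 ≤ PySem.Str.len try_expl ∧ PySem.Str.len try_expl ≤ 1500)
    let interv_ok : Bool := decide (80 ≤ PySem.Str.len try_interv ∧ PySem.Str.len try_interv ≤ 1000)
    if expl_ok && interv_ok then .inl (try_expl, try_interv)
    else
      let expl_penalty : Int := if expl_ok then 0 else min |PySem.Str.len try_expl - 200| |PySem.Str.len try_expl - 1500|
      let interv_penalty : Int := if interv_ok then 0 else min |PySem.Str.len try_interv - 80| |PySem.Str.len try_interv - 1000|
      let score := expl_penalty + interv_penalty
      match best_score with
      | none => pvA_loop sentences rest try_idx (some score)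
      | some b => if score < b then pvA_loop sentences rest try_idx (some score)
                  else pvA_loop sentences rest best_split (some b)

def adjust_split_for_char_counts (expl : String) (interv : String) (sentences : List String) (split_idx : Int) : String × String :=
  if (200 ≤ PySem.Str.len expl ∧ PySem.Str.len expl ≤ 1500) ∧ (80 ≤ PySem.Str.len interv ∧ PySem.Str.len interv ≤ 1000) then
    (expl, interv)
  else
    match pvA_loop sentences (PySem.List.pyRange 1 (sentences.length : Int)) split_idx none with
    | .inl p => p
    | .inr best =>
      (PySem.Str.join " " (PySem.List.slice sentences none (some best)),
       PySem.Str.join " " (PySem.List.slice sentences (some best) none))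

-- ===== PORT B =====
-- port of Source B's helper _penalty
def pvPenalty (x lo hi : Int) : Int :=
  if lo ≤ x ∧ x ≤ hi then 0 else min |x - lo| |x - hi|

-- Source B's prefix-sum pass ('for L in lens: acc += L; pref.append(acc)')
def pvPrefLoop (lens : List Int) (acc : Int) (pref : List Int) : List Int :=
  match lens with
  | [] => pref
  | L :: rest => pvPrefLoop rest (acc + L) (pref ++ [acc + L])

def adjust_split_for_char_counts_alt (expl : String) (interv : String) (sentences : List String) (split_idx : Int) : String × String :=
  if (200 ≤ PySem.Str.len expl ∧ PySem.Str.len expl ≤ 1500) ∧ (80 ≤ PySem.Str.len interv ∧ PySem.Str.len interv ≤ 1000) then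
    (expl, interv)
  else
    let n := (sentences.length : Int)
    let lens := sentences.map PySem.Str.len
    let total := lens.sum + n - 1
    let pref := pvPrefLoop lens 0 []
    let cand := (PySem.List.enumerate (PySem.List.slice pref none (some (-1))) 1).map
      (fun ip => (ip.1, ip.2 + ip.1 - 1, total - (ip.2 + ip.1 - 1) - 1))
    -- next((i for i, le, li in cand if …), None)
    let good := (cand.find? (fun c => decide (200 ≤ c.2.1 ∧ c.2.1 ≤ 1500) && decide (80 ≤ c.2.2 ∧ c.2.2 ≤ 1000))).map (fun c => c.1)
    let best :=
      match good with
      | some i => i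
      | none =>
        let scored := cand.map (fun c => (pvPenalty c.2.1 200 1500 + pvPenalty c.2.2 80 1000, c.1))
        -- min(scored)[1] if scored else split_idx  (Python min on tuples = first lexicographic minimum)
        match PySem.List.min2? scored (fun t => t.1) (fun t => t.2) with
        | some t => t.2
        | none => split_idx
    (PySem.Str.join " " (PySem.List.slice sentences none (some best)),
     PySem.Str.join " " (PySem.List.slice sentences (some best) none))

-- ===== PRECONDITION & SPEC =====
def Spec_adjust_split_for_char_counts (expl : String) (interv : String) (sentences : List String) (split_idx : Int) (out : String × String) : Prop := out = adjust_split_for_char_counts_alt expl interv sentences split_idx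
instance (expl : String) (interv : String) (sentences : List String) (split_idx : Int) (out : String × String) : Decidable (Spec_adjust_split_for_char_counts expl interv sentences split_idx out) := by unfold Spec_adjust_split_for_char_counts; infer_instance

-- ===== CLAIM (what is proved, stated in full; the proofs are below) =====
def Claim_equal_adjust_split_for_char_counts : Prop := ∀ (expl : String) (interv : String) (sentences : List String) (split_idx : Int), Dom_adjust_split_for_char_counts expl interv sentences split_idx → Spec_adjust_split_for_char_counts expl interv sentences split_idx (adjust_split_for_char_counts expl interv sentences split_idx)

-- ===== LEMMAS AND PROOFS =====

-- length of ' '.join over a nonempty list of char-lists (stated +1 to avoid Nat subtraction)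
theorem pv_join_len (ps : List (List Char)) (h : ps ≠ []) :
    (PySem.Chars.join [' '] ps).length + 1 = (ps.map List.length).sum + ps.length := by
  induction ps with
  | nil => exact absurd rfl h
  | cons p rest ih =>
    cases rest with
    | nil => simp [PySem.Chars.join_singleton]
    | cons q rest' =>
      rw [PySem.Chars.join_cons_cons]
      have h2 := ih (List.cons_ne_nil _ _)
      simp only [List.length_append, List.map_cons, List.sum_cons, List.length_cons,
        List.length_nil] at h2 ⊢
      omega

theorem pv_sumlen (ys : List String) :
    (((ys.map fun s => s.toList.length).sum : Nat) : Int) = (ys.map PySem.Str.len).sum := by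
  induction ys with
  | nil => simp
  | cons a t ih =>
    rw [List.map_cons, List.sum_cons, List.map_cons, List.sum_cons, Nat.cast_add, ih,
      PySem.Str.len_eq]

-- Str-level: length of ' '.join ys as an Int, ys nonempty
theorem pv_join_len_str (ys : List String) (h : ys ≠ []) :
    PySem.Str.len (PySem.Str.join " " ys) = (ys.map PySem.Str.len).sum + (ys.length : Int) - 1 := by
  rw [PySem.Str.len_eq, PySem.Str.toList_join]
  have h1 := pv_join_len (ys.map String.toList) (by simpa using h)
  have h2 := pv_sumlen ys
  have h3 : ((ys.map String.toList).map List.length) = ys.map fun s => s.toList.length := by simp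
  rw [h3, List.length_map] at h1
  have hsep : (" " : String).toList = [' '] := rfl
  rw [hsep]
  omega

-- render A's loop result to the final pair
def pvRender (sentences : List String) (r : (String × String) ⊕ Int) : String × String :=
  match r with
  | .inl p => p
  | .inr b =>
    (PySem.Str.join " " (PySem.List.slice sentences none (some b)),
     PySem.Str.join " " (PySem.List.slice sentences (some b) none))

def pvJoinsAt (sentences : List String) (b : Int) : String × String :=
  (PySem.Str.join " " (PySem.List.slice sentences none (some b)),
   PySem.Str.join " " (PySem.List.slice sentences (some b) none))

-- closed forms for the candidate join lengths
def pvLe (S : List String) (k : Nat) : Int := ((S.map PySem.Str.len).take (k + 1)).sum + (k : Int)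
def pvLi (S : List String) (k : Nat) : Int :=
  (S.map PySem.Str.len).sum + (S.length : Int) - 1 - pvLe S k - 1

-- the candidate list B builds, in closed form
def pvCand (S : List String) : List (Int × Int × Int) :=
  (List.range (S.length - 1)).map (fun (k : Nat) => ((k : Int) + 1, pvLe S k, pvLi S k))

def pvOk (c : Int × Int × Int) : Bool :=
  decide (200 ≤ c.2.1 ∧ c.2.1 ≤ 1500) && decide (80 ≤ c.2.2 ∧ c.2.2 ≤ 1000)

def pvScore (c : Int × Int × Int) : Int × Int :=
  (pvPenalty c.2.1 200 1500 + pvPenalty c.2.2 80 1000, c.1)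

-- A's loop abstracted over the candidate triples
def pvRefA (cs : List (Int × Int × Int)) (bs : Int) (sc : Option Int) : Int :=
  match cs with
  | [] => bs
  | c :: rest =>
    if pvOk c then c.1
    else
      let score := (pvScore c).1
      match sc with
      | none => pvRefA rest c.1 (some score)
      | some b => if score < b then pvRefA rest c.1 (some score)
                  else pvRefA rest bs (some b)

-- min2?'s fold with an explicit accumulator
def pvMinFold (acc : Option (Int × Int)) (xs : List (Int × Int)) : Option (Int × Int) :=
  xs.foldl
    (fun acc x =>
      match acc with
      | none => some x
      | some m =>
        if (decide (x.1 < m.1) || !decide (m.1 < x.1) && decide (x.2 < m.2)) = true then some x else some m)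
    acc

theorem pv_min2_eq_minFold (xs : List (Int × Int)) :
    PySem.List.min2? xs (fun t => t.1) (fun t => t.2) = pvMinFold none xs := by
  unfold PySem.List.min2? pvMinFold
  congr 1
  funext acc x
  cases acc <;> rfl

theorem pv_minFold_none_cons (x : Int × Int) (xs : List (Int × Int)) :
    pvMinFold none (x :: xs) = pvMinFold (some x) xs := rfl

theorem pv_minFold_some_cons (m x : Int × Int) (xs : List (Int × Int)) :
    pvMinFold (some m) (x :: xs)
      = pvMinFold (if (decide (x.1 < m.1) || !decide (m.1 < x.1) && decide (x.2 < m.2)) = true then some x else some m) xs := rfl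

-- a fold started from a non-empty accumulator returns a value
theorem pv_minFold_some (xs : List (Int × Int)) :
    ∀ (m : Int × Int), ∃ t, pvMinFold (some m) xs = some t := by
  induction xs with
  | nil => exact fun m => ⟨m, rfl⟩
  | cons x xs ih =>
    intro m
    rw [pv_minFold_some_cons]
    split_ifs with h
    · exact ih x
    · exact ih m

-- the fallback of the staged match is irrelevant once the accumulator is non-empty
theorem pv_staged_acc (rest : List (Int × Int × Int)) (m : Int × Int) (b1 b2 : Int) :
    (match rest.find? pvOk with
     | some c => c.1
     | none => match pvMinFold (some m) (rest.map pvScore) with | some t => t.2 | none => b1)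
    = (match rest.find? pvOk with
     | some c => c.1
     | none => match pvMinFold (some m) (rest.map pvScore) with | some t => t.2 | none => b2) := by
  cases rest.find? pvOk with
  | some c => rfl
  | none =>
    obtain ⟨t, ht⟩ := pv_minFold_some (rest.map pvScore) m
    rw [ht]

-- Step 2: A's loop over the triples equals B's staged find?/min computation
theorem pv_refA_staged (cs : List (Int × Int × Int)) :
    ∀ (bs : Int) (sc : Option Int),
    cs.Pairwise (fun a c => a.1 < c.1) →
    (∀ b, sc = some b → ∀ c ∈ cs, bs < c.1) →
    pvRefA cs bs sc =
      (match cs.find? pvOk with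
       | some c => c.1
       | none =>
         match pvMinFold (sc.map (fun b => (b, bs))) (cs.map pvScore) with
         | some t => t.2
         | none => bs) := by
  induction cs with
  | nil =>
    intro bs sc _ _
    cases sc <;> simp [pvRefA, pvMinFold]
  | cons c rest ih =>
    intro bs sc hpw hsc
    have hpw' := (List.pairwise_cons.mp hpw)
    by_cases hok : pvOk c = true
    · simp [pvRefA, hok]
    · have hfind : List.find? pvOk (c :: rest) = List.find? pvOk rest :=
        List.find?_cons_of_neg (by simp [hok])
      have hacc : ((pvScore c).1, c.1) = pvScore c := rfl
      rw [hfind, List.map_cons]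
      cases sc with
      | none =>
        rw [show pvRefA (c :: rest) bs none = pvRefA rest c.1 (some (pvScore c).1) by
          simp [pvRefA, hok]]
        rw [ih c.1 (some (pvScore c).1) hpw'.2 (by intro b hb c' hc'; cases hb; exact hpw'.1 c' hc')]
        simp only [Option.map_some, Option.map_none, hacc, pv_minFold_none_cons]
        exact pv_staged_acc rest (pvScore c) c.1 bs
      | some b =>
        have hblt : bs < c.1 := hsc b rfl c (List.mem_cons_self)
        simp only [Option.map_some, pv_minFold_some_cons]
        have hcond : (decide ((pvScore c).1 < (b, bs).1) || !decide ((b, bs).1 < (pvScore c).1) && decide ((pvScore c).2 < (b, bs).2)) = decide ((pvScore c).1 < b) := by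
          have h2 : (pvScore c).2 = c.1 := rfl
          by_cases hlt : (pvScore c).1 < b
          · simp [hlt]
          · have : ¬ (pvScore c).2 < (b, bs).2 := by rw [h2]; simp; omega
            simp [hlt, this]
        rw [hcond]
        by_cases hlt : (pvScore c).1 < b
        · rw [show pvRefA (c :: rest) bs (some b) = pvRefA rest c.1 (some (pvScore c).1) by
            simp [pvRefA, hok, hlt]]
          rw [ih c.1 (some (pvScore c).1) hpw'.2 (by intro b' hb' c' hc'; cases hb'; exact hpw'.1 c' hc')]
          simp only [Option.map_some, hacc, hlt, decide_true, if_true]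
          exact pv_staged_acc rest (pvScore c) c.1 bs
        · rw [show pvRefA (c :: rest) bs (some b) = pvRefA rest bs (some b) by
            simp [pvRefA, hok, hlt]]
          rw [ih bs (some b) hpw'.2 (by intro b' hb' c' hc'; cases hb'; exact lt_trans hblt (hpw'.1 c' hc'))]
          simp only [Option.map_some, hlt, decide_false, if_false, Bool.false_eq_true]

-- Step 1: A's real loop, rendered, equals pvRefA on the candidate triples
theorem pv_loopA_eq (S : List String) (rest : List Int) :
    ∀ (j : Nat) (bs : Int) (sc : Option Int),
    (S.map PySem.Str.len).dropLast.drop j = rest →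
    pvRender S (pvA_loop S (PySem.List.pyRange ((j : Int) + 1) (S.length : Int)) bs sc)
      = pvJoinsAt S (pvRefA ((pvCand S).drop j) bs sc) := by
  induction rest with
  | nil =>
    intro j bs sc hdrop
    have hj : S.length - 1 ≤ j := by
      have := congrArg List.length hdrop
      simp at this
      omega
    have hrange : PySem.List.pyRange ((j : Int) + 1) (S.length : Int) = [] := by
      rw [PySem.List.pyRange_one]
      have hz : ((S.length : Int) - ((j : Int) + 1)).toNat = 0 := by omega
      rw [hz]
      simp
    have hcand : (pvCand S).drop j = [] := by
      apply List.drop_eq_nil_of_le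
      simp [pvCand]
      omega
    rw [hrange, hcand]
    simp [pvA_loop, pvRefA, pvRender, pvJoinsAt]
  | cons L rest' ih =>
    intro j bs sc hdrop
    have hlenc := congrArg List.length hdrop
    simp only [List.length_drop, List.length_dropLast, List.length_map, List.length_cons] at hlenc
    have hjlt : j + 1 < S.length := by omega
    have hrange : PySem.List.pyRange ((j : Int) + 1) (S.length : Int) =
        ((j : Int) + 1) :: PySem.List.pyRange ((j : Int) + 1 + 1) (S.length : Int) := by
      apply PySem.List.pyRange_one_cons
      exact_mod_cast hjlt
    -- L is the length of sentence j
    have hL : (S.map PySem.Str.len)[j]? = some L := by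
      have h1 : ((S.map PySem.Str.len).dropLast.drop j)[0]? = some L := by rw [hdrop]; rfl
      rw [List.getElem?_drop, List.getElem?_dropLast] at h1
      simp only [List.length_map, Nat.add_zero] at h1
      split at h1
      · exact h1
      · exact absurd h1 (by simp)
    have htake : ((S.map PySem.Str.len).take (j + 1)).sum = ((S.map PySem.Str.len).take j).sum + L := by
      have hj2 : j < (S.map PySem.Str.len).length := by simp; omega
      have : (S.map PySem.Str.len).take (j + 1) = (S.map PySem.Str.len).take j ++ [(S.map PySem.Str.len)[j]] := by
        rw [← List.take_concat_get']
      rw [this]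
      have : (S.map PySem.Str.len)[j] = L := by
        have := List.getElem?_eq_getElem hj2
        rw [hL] at this
        exact (Option.some_injective _ this).symm
      simp [this]
    have hdrop' : (S.map PySem.Str.len).dropLast.drop (j + 1) = rest' := by
      have := congrArg List.tail hdrop
      simpa [List.tail_drop] using this
    have hslice1 : PySem.List.slice S none (some ((j : Int) + 1)) = S.take (j + 1) := by
      have := PySem.List.slice_to_natCast S (j + 1)
      push_cast at this
      exact this
    have hslice2 : PySem.List.slice S (some ((j : Int) + 1)) none = S.drop (j + 1) := by
      have := PySem.List.slice_from_natCast S (j + 1)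
      push_cast at this
      exact this
    have htne : S.take (j + 1) ≠ [] := by
      have hl : (S.take (j + 1)).length = j + 1 := by rw [List.length_take]; omega
      intro hc
      rw [hc] at hl
      simp at hl
    have hdne : S.drop (j + 1) ≠ [] := by
      have hl : (S.drop (j + 1)).length = S.length - (j + 1) := List.length_drop
      intro hc
      rw [hc] at hl
      simp at hl
      omega
    have hle : PySem.Str.len (PySem.Str.join " " (PySem.List.slice S none (some ((j : Int) + 1))))
        = pvLe S j := by
      rw [hslice1, pv_join_len_str _ htne, List.map_take, pvLe, htake]
      have hl : (S.take (j + 1)).length = j + 1 := by rw [List.length_take]; omega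
      rw [hl]
      push_cast
      ring
    have hli : PySem.Str.len (PySem.Str.join " " (PySem.List.slice S (some ((j : Int) + 1)) none))
        = pvLi S j := by
      rw [hslice2, pv_join_len_str _ hdne, List.map_drop, pvLi, pvLe, htake]
      have hsplit : ((S.map PySem.Str.len).take (j + 1)).sum + ((S.map PySem.Str.len).drop (j + 1)).sum = (S.map PySem.Str.len).sum := by
        rw [← List.sum_append, List.take_append_drop]
      have h1 : ((S.map PySem.Str.len).drop (j + 1)).sum = (S.map PySem.Str.len).sum - (((S.map PySem.Str.len).take j).sum + L) := by
        rw [← htake]; omega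
      rw [h1]
      have h2 : (S.drop (j + 1)).length = S.length - (j + 1) := List.length_drop
      rw [h2]
      rw [Nat.cast_sub (le_of_lt hjlt)]
      push_cast
      ring
    have hcand : (pvCand S).drop j = ((j : Int) + 1, pvLe S j, pvLi S j) :: (pvCand S).drop (j + 1) := by
      have hjr : j < (List.range (S.length - 1)).length := by simp; omega
      have hjc : j < (pvCand S).length := by simp [pvCand]; omega
      rw [List.drop_eq_getElem_cons hjc]
      congr 1
      simp [pvCand]
    rw [hrange, hcand]
    show pvRender S (pvA_loop S _ bs sc) = _
    rw [pvA_loop, pvRefA]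
    simp only [hle, hli]
    have hok : pvOk ((j : Int) + 1, pvLe S j, pvLi S j)
        = (decide (200 ≤ pvLe S j ∧ pvLe S j ≤ 1500) && decide (80 ≤ pvLi S j ∧ pvLi S j ≤ 1000)) := rfl
    have hsc : (pvScore ((j : Int) + 1, pvLe S j, pvLi S j)).1
        = (if decide (200 ≤ pvLe S j ∧ pvLe S j ≤ 1500) = true then (0:Int) else min |pvLe S j - 200| |pvLe S j - 1500|)
          + (if decide (80 ≤ pvLi S j ∧ pvLi S j ≤ 1000) = true then (0:Int) else min |pvLi S j - 80| |pvLi S j - 1000|) := by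
      simp only [pvScore, pvPenalty, decide_eq_true_eq]
    have harith : (j : Int) + 1 + 1 = ((j + 1 : Nat) : Int) + 1 := by push_cast; ring
    simp only [hok, hsc]
    by_cases hb : (decide (200 ≤ pvLe S j ∧ pvLe S j ≤ 1500) && decide (80 ≤ pvLi S j ∧ pvLi S j ≤ 1000)) = true
    · simp only [hb, if_true]
      simp [pvRender, pvJoinsAt]
    · simp only [hb, if_false, Bool.false_eq_true]
      cases sc with
      | none =>
        rw [harith, ih (j + 1) ((j : Int) + 1) _ hdrop']
      | some b =>
        by_cases hlt : (if decide (200 ≤ pvLe S j ∧ pvLe S j ≤ 1500) = true then (0:Int) else min |pvLe S j - 200| |pvLe S j - 1500|) + (if decide (80 ≤ pvLi S j ∧ pvLi S j ≤ 1000) = true then (0:Int) else min |pvLi S j - 80| |pvLi S j - 1000|) < b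
        · simp only [hlt, if_true]
          rw [harith, ih (j + 1) ((j : Int) + 1) _ hdrop']
        · simp only [hlt, if_false]
          rw [harith, ih (j + 1) bs _ hdrop']

-- Step 0: the candidate list B builds is pvCand
theorem pv_prefLoop_spec (lens : List Int) :
    ∀ (a : Int) (ys : List Int),
    pvPrefLoop lens a ys = ys ++ (List.range lens.length).map (fun k => a + (lens.take (k + 1)).sum) := by
  induction lens with
  | nil => intro a ys; simp [pvPrefLoop]
  | cons L t ih =>
    intro a ys
    rw [pvPrefLoop, ih]
    have hmap : (List.range (L :: t).length).map (fun k => a + ((L :: t).take (k + 1)).sum)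
        = (a + L) :: (List.range t.length).map (fun k => (a + L) + (t.take (k + 1)).sum) := by
      rw [List.length_cons, List.range_succ_eq_map, List.map_cons, List.map_map]
      refine congrArg₂ List.cons (by simp) ?_
      apply List.map_congr_left
      intro k _
      simp [List.take_succ_cons]
      ring
    rw [hmap]
    simp

theorem pv_cand_eq (S : List String) (split_total : Int)
    (htot : split_total = (S.map PySem.Str.len).sum + (S.length : Int) - 1) :
    ((PySem.List.enumerate (PySem.List.slice (pvPrefLoop (S.map PySem.Str.len) 0 []) none (some (-1))) 1).map
      (fun ip => (ip.1, ip.2 + ip.1 - 1, split_total - (ip.2 + ip.1 - 1) - 1))) = pvCand S := by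
  rw [pv_prefLoop_spec, List.nil_append, PySem.List.slice_to_neg_one]
  have hdl : ((List.range (S.map PySem.Str.len).length).map
      (fun k => 0 + ((S.map PySem.Str.len).take (k + 1)).sum)).dropLast
      = (List.range (S.length - 1)).map (fun k => 0 + ((S.map PySem.Str.len).take (k + 1)).sum) := by
    rw [← List.map_dropLast]
    congr 1
    cases hS : (S.map PySem.Str.len).length with
    | zero => simp at hS; simp [hS]
    | succ m =>
      rw [List.range_succ, List.dropLast_concat]
      congr 1
      have : S.length = m + 1 := by rw [← hS]; simp
      omega
  rw [hdl]
  apply List.ext_getElem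
  · simp [pvCand, PySem.List.length_enumerate]
  intro k h1 h2
  have hk : k < S.length - 1 := by
    simp [PySem.List.length_enumerate] at h1
    omega
  have he : (PySem.List.enumerate ((List.range (S.length - 1)).map
      (fun k => 0 + ((S.map PySem.Str.len).take (k + 1)).sum)) 1)[k]?
      = some (1 + (k : Int), 0 + ((S.map PySem.Str.len).take (k + 1)).sum) := by
    rw [PySem.List.getElem?_enumerate]
    rw [List.getElem?_map, List.getElem?_range hk]
    rfl
  have he' := List.getElem_eq_iff (by simpa [PySem.List.length_enumerate] using h1) |>.mpr he
  rw [List.getElem_map, he']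
  simp only [pvCand, List.getElem_map, List.getElem_range, htot, pvLe, pvLi]
  simp only [Prod.mk.injEq]
  refine ⟨by ring, by ring, by ring⟩

-- pvCand's indices are strictly increasing
theorem pv_cand_pairwise (S : List String) :
    (pvCand S).Pairwise (fun a c => a.1 < c.1) := by
  apply List.Pairwise.map
  · intro a b hab
    exact hab
  · exact (List.pairwise_lt_range).imp (by intro a b h; dsimp; omega)

-- ===== VERDICT (by name: the statement is the Claim_ definition above) =====
theorem adjust_split_for_char_counts_spec : Claim_equal_adjust_split_for_char_counts := by
  intro expl interv sentences split_idx _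
  unfold Spec_adjust_split_for_char_counts
  unfold adjust_split_for_char_counts adjust_split_for_char_counts_alt
  by_cases h : (200 ≤ PySem.Str.len expl ∧ PySem.Str.len expl ≤ 1500) ∧ (80 ≤ PySem.Str.len interv ∧ PySem.Str.len interv ≤ 1000)
  · rw [if_pos h, if_pos h]
  · rw [if_neg h, if_neg h]
    have hcand := pv_cand_eq sentences ((sentences.map PySem.Str.len).sum + (sentences.length : Int) - 1) rfl
    have key := pv_loopA_eq sentences (sentences.map PySem.Str.len).dropLast 0 split_idx none (by simp)
    simp only [Nat.cast_zero, zero_add, List.drop_zero] at key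
    have hA : (match pvA_loop sentences (PySem.List.pyRange 1 (sentences.length : Int)) split_idx none with
        | .inl p => p
        | .inr best => (PySem.Str.join " " (PySem.List.slice sentences none (some best)),
            PySem.Str.join " " (PySem.List.slice sentences (some best) none)))
        = pvRender sentences (pvA_loop sentences (PySem.List.pyRange 1 (sentences.length : Int)) split_idx none) := by
      cases pvA_loop sentences (PySem.List.pyRange 1 (sentences.length : Int)) split_idx none <;> rfl
    rw [hA, key]
    rw [pv_refA_staged (pvCand sentences) split_idx none (pv_cand_pairwise sentences) (by intro b hb; cases hb)]
    have hpred : (fun (c : Int × Int × Int) => decide (200 ≤ c.2.1 ∧ c.2.1 ≤ 1500) && decide (80 ≤ c.2.2 ∧ c.2.2 ≤ 1000)) = pvOk := rfl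
    have hscore : (fun (c : Int × Int × Int) => (pvPenalty c.2.1 200 1500 + pvPenalty c.2.2 80 1000, c.1)) = pvScore := rfl
    simp only [hcand, hpred, hscore, pv_min2_eq_minFold, Option.map_none]
    cases hf : (pvCand sentences).find? pvOk with
    | some c => rfl
    | none =>
      simp only [Option.map_none]
      cases hm : pvMinFold none ((pvCand sentences).map pvScore) with
      | some t => rfl
      | none => rfl
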